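-- pv_equiv track=rewrite | github.com/Grimakis/model100-basic-tools-python | src/pack_basic.py | pack_spaces
-- ===== SOURCE A (Python) =====
-- def pack_spaces(line):
--     """Remove unnecessary spaces while preserving strings and required keyword spacing.
--
--     ROM2/Cleuseau rules:
--     - Remove spaces except where required (before AND/OR, after DATA)
--     - Keep space after DATA keyword
--     """
--     in_string = False
--     result = []
--     i = 0
--     line_upper = line.upper()
--
--     while i < len(line):
--         char = line[i]
--
--         if char == '"':
--             in_string = not in_string
--             result.append(char)
--             i += 1
--             continue
--
--         if in_string:
--             result.append(char)
--             i += 1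
--             continue
--
--         # Outside strings - handle spaces carefully
--         if char == ' ':
--             # Look ahead to see what follows the space
--             remaining = line[i+1:].lstrip(' ')
--             if not remaining:
--                 i += 1
--                 continue
--
--             # Check if next word is AND/OR (need space before)
--             if remaining.upper().startswith('AND') or remaining.upper().startswith('OR'):
--                 # Keep ONE space before AND/OR
--                 if not result or result[-1] != ' ':
--                     result.append(' ')
--                 i += 1
--                 continue
--
--             # Otherwise skip the space
--             i += 1
--             continue
--
--         result.append(char)
--         i += 1
--
--     packed = ''.join(result)
--
--     # ROM2 keeps space after DATA keyword
--     # Check if line starts with DATA and fix the space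
--     packed_upper = packed.upper()
--     if packed_upper.startswith('DATA') and len(packed) > 4 and packed[4] != ' ':
--         # Insert space after DATA
--         packed = 'DATA ' + packed[4:]
--
--     return packed
-- ===== SOURCE B (Python) =====
-- def _pack_segment(seg):
--     """Pack one outside-string segment: drop space runs, keeping one space
--     before a run whose following text starts with AND/OR."""
--     out = []
--     i = 0
--     n = len(seg)
--     while i < n:
--         if seg[i] == ' ':
--             while i < n and seg[i] == ' ':
--                 i += 1
--             rest = seg[i:].upper()
--             if rest.startswith('AND') or rest.startswith('OR'):
--                 out.append(' ')
--         else: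
--             out.append(seg[i])
--             i += 1
--     return ''.join(out)
--
--
-- def pack_spaces(line):
--     """Remove unnecessary spaces while preserving strings and required keyword spacing.
--
--     Split on '"' so even segments are outside string literals and odd segments
--     inside; pack only the outside segments, rejoin, then fix the DATA spacing.
--     """
--     parts = line.split('"')
--     pieces = [seg if idx % 2 == 1 else _pack_segment(seg)
--               for idx, seg in enumerate(parts)]
--     packed = '"'.join(pieces)
--
--     # ROM2 keeps space after DATA keyword
--     if packed.upper().startswith('DATA') and len(packed) > 4 and packed[4] != ' ':
--         packed = 'DATA ' + packed[4:]
--     return packed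
-- ===== Notes on version B (the rewrite author's own statement) =====
-- stated objective: alternative
-- what changed: Replaces A's char-by-char in_string state machine (with per-space whole-line lookahead) by splitting the line at the double-quote character into outside/inside segments and packing each outside segment run-of-spaces at a time, then rejoining and applying the DATA fix.
import Mathlib
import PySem

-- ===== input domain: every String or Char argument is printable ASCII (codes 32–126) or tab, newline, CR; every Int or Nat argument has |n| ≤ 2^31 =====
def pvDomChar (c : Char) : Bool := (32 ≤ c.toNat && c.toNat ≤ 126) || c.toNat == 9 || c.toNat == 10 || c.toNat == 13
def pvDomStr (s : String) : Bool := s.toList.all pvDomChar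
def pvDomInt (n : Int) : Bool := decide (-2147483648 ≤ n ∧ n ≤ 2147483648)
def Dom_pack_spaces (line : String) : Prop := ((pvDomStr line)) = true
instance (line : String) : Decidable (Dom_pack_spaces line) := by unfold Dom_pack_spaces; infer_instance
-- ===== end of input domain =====

-- B replaces A's char-by-char in_string state machine by split-on-quote + per-segment
-- space-run packing (objective: alternative decomposition, same asymptotic cost).

-- ===== PORT A =====

-- shared by both Pythons: remaining.upper().startswith('AND') or remaining.upper().startswith('OR')
def andOrNext (l : List Char) : Bool :=
  PySem.Chars.startswith (PySem.Chars.upper l) ['A', 'N', 'D'] ||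
    PySem.Chars.startswith (PySem.Chars.upper l) ['O', 'R']

-- exact port of `.lstrip(' ')`: drop leading ' ' characters only
def lstripSp (l : List Char) : List Char := l.dropWhile (· == ' ')

-- A's while-loop: i-indexed scan ported as structural recursion on the remaining suffix
def aLoop : List Char → Bool → List Char → List Char
  | [], _inStr, result => result
  | c :: rest, inStr, result =>
    if c == '"' then aLoop rest (!inStr) (result ++ [c])
    else if inStr then aLoop rest inStr (result ++ [c])
    else if c == ' ' then
      let remaining := lstripSp rest
      if remaining.isEmpty then aLoop rest inStr result
      else if andOrNext remaining then
        if result.isEmpty || result.getLast? != some ' ' then aLoop rest inStr (result ++ [' '])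
        else aLoop rest inStr result
      else aLoop rest inStr result
    else aLoop rest inStr (result ++ [c])

-- shared trailing DATA fix of both Pythons; packed[4] exists because len(packed) > 4
def dataFix (p : List Char) : List Char :=
  if PySem.Chars.startswith (PySem.Chars.upper p) ['D', 'A', 'T', 'A'] && decide (4 < p.length)
      && !(p[4]? == some ' ') then
    ['D', 'A', 'T', 'A', ' '] ++ p.drop 4
  else p

def pack_spaces (line : String) : String :=
  String.ofList (dataFix (aLoop line.toList false []))

-- ===== PORT B =====

-- exact hand port of Python's str.split('"') (single-char separator, empty pieces kept)
def splitQ : List Char → List (List Char)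
  | [] => [[]]
  | c :: r =>
    if c == '"' then [] :: splitQ r
    else
      match splitQ r with
      | [] => [[c]]
      | p :: ps => (c :: p) :: ps

-- Source B's _pack_segment: consume a whole space run at once
def segRuns (l : List Char) : List Char :=
  match l with
  | [] => []
  | c :: rest =>
    if c == ' ' then
      (if andOrNext (rest.dropWhile (· == ' ')) then [' '] else []) ++
        segRuns (rest.dropWhile (· == ' '))
    else c :: segRuns rest
termination_by l.length
decreasing_by
  · have := List.length_dropWhile_le (· == ' ') rest; simp; omega
  · simp

def pack_spaces_alt (line : String) : String :=
  let parts := splitQ line.toList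
  let pieces := (PySem.List.enumerate parts).map
    (fun p => if PySem.Int.mod p.1 2 == 1 then p.2 else segRuns p.2)
  String.ofList (dataFix (PySem.Chars.join ['"'] pieces))

-- ===== PRECONDITION & SPEC =====
def Spec_pack_spaces (line : String) (out : String) : Prop := out = pack_spaces_alt line
instance (line : String) (out : String) : Decidable (Spec_pack_spaces line out) := by unfold Spec_pack_spaces; infer_instance

-- ===== CLAIM (what is proved, stated in full; the proofs are below) =====
def Claim_equal_pack_spaces : Prop := ∀ (line : String), Dom_pack_spaces line → Spec_pack_spaces line (pack_spaces line)

-- ===== LEMMAS AND PROOFS =====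

-- the joined, parity-processed pieces, as one recursive function
def altOut : Bool → List (List Char) → List Char
  | _, [] => []
  | b, s :: ss =>
    (if b then s else segRuns s) ++ (match ss with | [] => [] | _ :: _ => '"' :: altOut (!b) ss)

-- what follows the first piece in the joined string
def tailGlue : List (List Char) → List Char
  | [] => []
  | p :: ps => '"' :: PySem.Chars.join ['"'] (p :: ps)

theorem andOrNext_nil : andOrNext [] = false := by decide

theorem segRuns_nil : segRuns [] = [] := by simp [segRuns]

theorem segRuns_cons_nonspace (c : Char) (r : List Char) (hc : c ≠ ' ') :
    segRuns (c :: r) = c :: segRuns r := by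
  rw [segRuns]; simp [hc]

theorem tailGlue_of_ne_nil (l : List (List Char)) (h : l ≠ []) :
    tailGlue l = '"' :: PySem.Chars.join ['"'] l := by
  cases l with
  | nil => exact absurd rfl h
  | cons a t => rfl

theorem splitQ_ne_nil (l : List Char) : splitQ l ≠ [] := by
  cases l with
  | nil => simp [splitQ]
  | cons c r =>
    simp only [splitQ]
    split
    · simp
    · cases h : splitQ r <;> simp

theorem splitQ_append (u : List Char) (hu : '"' ∉ u) :
    ∀ v p ps, splitQ v = p :: ps → splitQ (u ++ v) = (u ++ p) :: ps := by
  induction u with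
  | nil => intro v p ps h; simpa using h
  | cons c u ih =>
    intro v p ps h
    have hc : ¬ (c == '"') = true := by
      simp only [beq_iff_eq]; intro hcq; exact hu (hcq ▸ List.mem_cons_self)
    have hu' : '"' ∉ u := fun hm => hu (List.mem_cons_of_mem _ hm)
    simp only [List.cons_append, splitQ, if_neg hc, ih hu' v p ps h]

theorem join_cons (p : List Char) (ps : List (List Char)) :
    PySem.Chars.join ['"'] (p :: ps) = p ++ tailGlue ps := by
  cases ps with
  | nil => simp [PySem.Chars.join, List.intercalate, tailGlue]
  | cons q t => simp [PySem.Chars.join, List.intercalate, List.intersperse, tailGlue]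

theorem join_splitQ (l : List Char) : PySem.Chars.join ['"'] (splitQ l) = l := by
  induction l with
  | nil => simp [splitQ, PySem.Chars.join, List.intercalate]
  | cons c r ih =>
    obtain ⟨p, ps, hsp⟩ : ∃ p ps, splitQ r = p :: ps := by
      cases h : splitQ r with
      | nil => exact absurd h (splitQ_ne_nil r)
      | cons p ps => exact ⟨p, ps, rfl⟩
    rw [hsp] at ih
    by_cases hc : (c == '"') = true
    · have hq : splitQ (c :: r) = [] :: p :: ps := by simp [splitQ, hc, hsp]
      rw [hq, join_cons]
      simp only [tailGlue, List.nil_append]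
      rw [ih]
      simp only [beq_iff_eq] at hc
      rw [hc]
    · have hq : splitQ (c :: r) = (c :: p) :: ps := by simp [splitQ, hc, hsp]
      have ih' : p ++ tailGlue ps = r := by rw [← join_cons]; exact ih
      rw [hq, join_cons, List.cons_append, ih']

theorem splitQ_recover (l p : List Char) (ps : List (List Char)) (h : splitQ l = p :: ps) :
    l = p ++ tailGlue ps := by
  have := join_splitQ l
  rw [h, join_cons] at this
  exact this.symm

theorem tailGlue_shape (ps : List (List Char)) :
    tailGlue ps = [] ∨ ∃ t, tailGlue ps = '"' :: t := by
  cases ps with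
  | nil => left; rfl
  | cons q t => right; exact ⟨_, rfl⟩

theorem isPrefixOf_append_quote (w : List Char) (hw : '"' ∉ w) :
    ∀ u v, (v = [] ∨ ∃ t, v = '"' :: t) → w.isPrefixOf (u ++ v) = w.isPrefixOf u := by
  induction w with
  | nil => intro u v _; simp [List.isPrefixOf]
  | cons a w ih =>
    intro u v hv
    cases u with
    | nil =>
      rcases hv with h | ⟨t, h⟩ <;> subst h
      · simp
      · have ha : ¬ (a == '"') = true := by
          simp only [beq_iff_eq]; intro h; exact hw (h ▸ List.mem_cons_self)
        simp [List.isPrefixOf, ha]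
    | cons b u =>
      have hw' : '"' ∉ w := fun hm => hw (List.mem_cons_of_mem _ hm)
      simp [List.isPrefixOf, ih hw' u v hv]

theorem upper_quote_shape (v : List Char) (hv : v = [] ∨ ∃ t, v = '"' :: t) :
    PySem.Chars.upper v = [] ∨ ∃ t, PySem.Chars.upper v = '"' :: t := by
  rcases hv with h | ⟨t, h⟩ <;> subst h
  · left; simp [PySem.Chars.upper]
  · right; exact ⟨PySem.Chars.upper t, by simp [PySem.Chars.upper]; decide⟩

theorem andOrNext_append (p v : List Char) (hv : v = [] ∨ ∃ t, v = '"' :: t) :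
    andOrNext (p ++ v) = andOrNext p := by
  have hsh := upper_quote_shape v hv
  simp only [andOrNext, PySem.Chars.startswith, PySem.Chars.upper, List.map_append]
  rw [isPrefixOf_append_quote _ (by decide) _ _ (by simpa [PySem.Chars.upper] using hsh),
      isPrefixOf_append_quote _ (by decide) _ _ (by simpa [PySem.Chars.upper] using hsh)]

theorem dropWhile_all_append (run rem : List Char) (hrun : ∀ x ∈ run, x = ' ')
    (hrem : rem.head? ≠ some ' ') : (run ++ rem).dropWhile (· == ' ') = rem := by
  induction run with
  | nil =>
    cases rem with
    | nil => rfl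
    | cons d r =>
      have : ¬ (d == ' ') = true := by
        simp only [beq_iff_eq]; intro h; exact hrem (by simp [h])
      simp [this]
  | cons c run ih =>
    have hc : c = ' ' := hrun c List.mem_cons_self
    simp only [List.cons_append, List.dropWhile, hc]
    exact ih (fun x hx => hrun x (List.mem_cons_of_mem _ hx))

theorem head?_dropWhile_ne (l : List Char) : (l.dropWhile (· == ' ')).head? ≠ some ' ' := by
  induction l with
  | nil => simp
  | cons c r ih =>
    by_cases hc : (c == ' ') = true
    · simpa [List.dropWhile, hc] using ih
    · simp only [List.dropWhile, hc]
      simp only [beq_iff_eq] at hc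
      simp [hc]

-- one aLoop step on a space, the three ways it can go
theorem step_empty (r acc : List Char) (h : lstripSp r = []) :
    aLoop (' ' :: r) false acc = aLoop r false acc := by
  simp [aLoop, h]

theorem step_skip (r acc : List Char) (h : lstripSp r ≠ [])
    (hA : andOrNext (lstripSp r) = false ∨ acc.getLast? = some ' ') :
    aLoop (' ' :: r) false acc = aLoop r false acc := by
  have hne : acc ≠ [] → acc.isEmpty = false := by intro h2; simpa using h2
  rcases hA with hA | hA
  · simp [aLoop, h, hA]
  · have hnn : acc ≠ [] := by intro h2; subst h2; simp at hA
    simp [aLoop, h, hA, hne hnn]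

theorem step_emit (r acc : List Char) (h : lstripSp r ≠ [])
    (hA : andOrNext (lstripSp r) = true) (ha : acc.getLast? ≠ some ' ') :
    aLoop (' ' :: r) false acc = aLoop r false (acc ++ [' ']) := by
  simp [aLoop, h, hA, ha]

theorem skip_spaces (run : List Char) :
    ∀ rem acc, (∀ x ∈ run, x = ' ') → rem.head? ≠ some ' ' →
      (andOrNext rem = false ∨ acc.getLast? = some ' ') →
      aLoop (run ++ rem) false acc = aLoop rem false acc := by
  induction run with
  | nil => intro rem acc _ _ _; rfl
  | cons c run ih =>
    intro rem acc hrun hrem hk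
    have hc : c = ' ' := hrun c List.mem_cons_self
    have hrun' : ∀ x ∈ run, x = ' ' := fun x hx => hrun x (List.mem_cons_of_mem _ hx)
    have hdw : lstripSp (run ++ rem) = rem := dropWhile_all_append run rem hrun' hrem
    subst hc
    have ihr := ih rem acc hrun' hrem hk
    rw [List.cons_append]
    by_cases hr : rem = []
    · rw [step_empty _ _ (by rw [hdw]; exact hr), ihr]
    · rw [step_skip _ _ (by rw [hdw]; exact hr) (by rw [hdw]; exact hk), ihr]

theorem key (n : Nat) : ∀ (l : List Char) (b : Bool) (acc : List Char), l.length ≤ n →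
    (b = false → l.head? = some ' ' → acc.getLast? ≠ some ' ') →
    aLoop l b acc = acc ++ altOut b (splitQ l) := by
  induction n with
  | zero =>
    intro l b acc hlen _
    have : l = [] := List.eq_nil_of_length_eq_zero (Nat.le_zero.mp hlen)
    subst this
    cases b <;> simp [aLoop, splitQ, altOut, segRuns_nil]
  | succ n ih =>
    intro l b acc hlen hacc
    cases l with
    | nil => cases b <;> simp [aLoop, splitQ, altOut, segRuns_nil]
    | cons c r =>
      have hrlen : r.length ≤ n := by simpa using hlen
      obtain ⟨p, ps, hsp⟩ : ∃ p ps, splitQ r = p :: ps := by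
        cases h : splitQ r with
        | nil => exact absurd h (splitQ_ne_nil r)
        | cons p ps => exact ⟨p, ps, rfl⟩
      by_cases hq : (c == '"') = true
      · -- quote: toggle in_string
        have hc : c = '"' := by simpa using hq
        subst hc
        have hstep := ih r (!b) (acc ++ ['"']) hrlen
          (by intro _ _; simp)
        have hsplit : splitQ ('"' :: r) = [] :: p :: ps := by simp [splitQ, hsp]
        calc aLoop ('"' :: r) b acc = aLoop r (!b) (acc ++ ['"']) := by simp [aLoop]
          _ = acc ++ ['"'] ++ altOut (!b) (p :: ps) := by rw [hstep, hsp]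
          _ = acc ++ altOut b (splitQ ('"' :: r)) := by
              rw [hsplit]
              cases b <;> simp [altOut, segRuns_nil]
      · have hsplit : splitQ (c :: r) = (c :: p) :: ps := by simp [splitQ, hq, hsp]
        cases b with
        | true =>
          have hstep := ih r true (acc ++ [c]) hrlen (by simp)
          calc aLoop (c :: r) true acc = aLoop r true (acc ++ [c]) := by simp [aLoop, hq]
            _ = acc ++ [c] ++ altOut true (p :: ps) := by rw [hstep, hsp]
            _ = acc ++ altOut true (splitQ (c :: r)) := by
                rw [hsplit]; cases ps <;> simp [altOut]
        | false =>
          by_cases hs : (c == ' ') = true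
          · -- the space case: A walks the run one space at a time, B jumps it
            have hc : c = ' ' := by simpa using hs
            subst hc
            have haccl : acc.getLast? ≠ some ' ' := hacc rfl rfl
            obtain ⟨run, hrundef⟩ : ∃ u, u = r.takeWhile (· == ' ') := ⟨_, rfl⟩
            obtain ⟨rem, hremdef⟩ : ∃ u, u = r.dropWhile (· == ' ') := ⟨_, rfl⟩
            have hsplitr : run ++ rem = r := by
              rw [hrundef, hremdef]; exact List.takeWhile_append_dropWhile
            have hrun : ∀ x ∈ run, x = ' ' := by
              intro x hx
              rw [hrundef] at hx
              simpa using List.mem_takeWhile_imp hx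
            have hremh : rem.head? ≠ some ' ' := by
              rw [hremdef]; exact head?_dropWhile_ne r
            obtain ⟨p', ps', hsp'⟩ : ∃ p' ps', splitQ rem = p' :: ps' := by
              cases h : splitQ rem with
              | nil => exact absurd h (splitQ_ne_nil rem)
              | cons p' ps' => exact ⟨p', ps', rfl⟩
            have hrq : '"' ∉ run := by
              intro hm; have := hrun _ hm; simp at this
            have hspr : splitQ r = (run ++ p') :: ps' := by
              rw [← hsplitr]; exact splitQ_append run hrq rem p' ps' hsp'
            have hpp := hsp.symm.trans hspr
            injection hpp with hp1 hp2
            have hrec : rem = p' ++ tailGlue ps' := splitQ_recover rem p' ps' hsp'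
            have hkeep : andOrNext rem = andOrNext p' := by
              rw [hrec]; exact andOrNext_append p' _ (tailGlue_shape ps')
            have hp'h : p'.head? ≠ some ' ' := by
              cases p' with
              | nil => simp
              | cons e p'' =>
                intro h
                simp only [List.head?, Option.some.injEq] at h
                exact hremh (by rw [hrec]; simp [h])
            have hdwp' : p'.dropWhile (· == ' ') = p' := by
              cases p' with
              | nil => rfl
              | cons e p'' =>
                have : ¬ (e == ' ') = true := by
                  simp only [beq_iff_eq]; intro h; exact hp'h (by simp [h])
                simp [this]
            have hlstrip : lstripSp r = rem := hremdef.symm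
            have hremlen : rem.length ≤ n :=
              le_trans (by rw [← hsplitr]; simp) hrlen
            have hseg : segRuns (' ' :: (run ++ p')) =
                (if andOrNext p' then [' '] else []) ++ segRuns p' := by
              have hd : (run ++ p').dropWhile (· == ' ') = p' :=
                dropWhile_all_append run p' hrun hp'h
              rw [segRuns]
              simp [hd]
            have hsplit' : splitQ (' ' :: r) = (' ' :: (run ++ p')) :: ps' := by
              rw [hsplit, hp1, hp2]
            have hRHS : altOut false (splitQ (' ' :: r)) =
                (if andOrNext p' then [' '] else []) ++ altOut false (splitQ rem) := by
              rw [hsplit', hsp']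
              cases ps' <;> simp [altOut, hseg]
            by_cases hrem0 : rem = []
            · -- only spaces to the end of the line: they are all dropped
              have hsp2 := hsp'
              rw [hrem0] at hsp2
              simp only [splitQ, List.cons.injEq] at hsp2
              have hkf : andOrNext p' = false := by
                rw [← hsp2.1]; exact andOrNext_nil
              have hrr : r = run := by rw [← hsplitr, hrem0, List.append_nil]
              calc aLoop (' ' :: r) false acc
                  = aLoop r false acc := by
                    apply step_empty; rw [hlstrip]; exact hrem0
                _ = aLoop [] false acc := by
                    calc aLoop r false acc = aLoop (run ++ []) false acc := by
                          rw [List.append_nil, ← hrr]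
                      _ = aLoop [] false acc := skip_spaces run [] acc hrun (by simp)
                          (Or.inl andOrNext_nil)
                _ = acc := rfl
                _ = acc ++ altOut false (splitQ (' ' :: r)) := by
                    rw [hRHS, hkf, hrem0]
                    simp [splitQ, altOut, segRuns_nil]
            · have hlne : lstripSp r ≠ [] := by rw [hlstrip]; exact hrem0
              by_cases hk : andOrNext rem = true
              · calc aLoop (' ' :: r) false acc
                    = aLoop r false (acc ++ [' ']) := by
                      exact step_emit r acc hlne (by rw [hlstrip]; exact hk) haccl
                  _ = aLoop rem false (acc ++ [' ']) := by
                      rw [← hsplitr]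
                      exact skip_spaces run rem (acc ++ [' ']) hrun hremh
                        (Or.inr List.getLast?_concat)
                  _ = acc ++ [' '] ++ altOut false (splitQ rem) := by
                      exact ih rem false (acc ++ [' ']) hremlen
                        (by intro _ h; exact absurd h hremh)
                  _ = acc ++ altOut false (splitQ (' ' :: r)) := by
                      rw [hRHS, hkeep.symm.trans hk]
                      simp
              · have hkf : andOrNext rem = false := by simpa using hk
                calc aLoop (' ' :: r) false acc
                    = aLoop r false acc := by
                      exact step_skip r acc hlne (Or.inl (by rw [hlstrip]; exact hkf))
                  _ = aLoop rem false acc := by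
                      rw [← hsplitr]
                      exact skip_spaces run rem acc hrun hremh (Or.inl hkf)
                  _ = acc ++ altOut false (splitQ rem) := by
                      exact ih rem false acc hremlen (by intro _ h; exact absurd h hremh)
                  _ = acc ++ altOut false (splitQ (' ' :: r)) := by
                      rw [hRHS, hkeep.symm.trans hkf]
                      simp
          · -- ordinary character outside a string
            have hc' : c ≠ ' ' := by simpa using hs
            have hstep := ih r false (acc ++ [c]) hrlen
              (by intro _ _; rw [List.getLast?_concat]; simp [hc'])
            calc aLoop (c :: r) false acc = aLoop r false (acc ++ [c]) := by
                  simp [aLoop, hq, hs]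
              _ = acc ++ [c] ++ altOut false (p :: ps) := by rw [hstep, hsp]
              _ = acc ++ altOut false (splitQ (c :: r)) := by
                  rw [hsplit]
                  rw [show altOut false ((c :: p) :: ps) =
                    segRuns (c :: p) ++ _ from rfl, segRuns_cons_nonspace c p hc']
                  cases ps <;> simp [altOut]

theorem mod2_cast (k : Nat) : ((k : Int) % 2 = 1) ↔ (k % 2 = 1) := by omega

theorem b_side (parts : List (List Char)) : ∀ (k : Nat),
    PySem.Chars.join ['"'] ((PySem.List.enumerate parts (k : Int)).map
      (fun p => if PySem.Int.mod p.1 2 == 1 then p.2 else segRuns p.2)) =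
    altOut (k % 2 == 1) parts := by
  induction parts with
  | nil => intro k; simp [PySem.List.enumerate_nil, PySem.Chars.join, List.intercalate, altOut]
  | cons s ss ih =>
    intro k
    have hmod : (PySem.Int.mod (k : Int) 2 == 1) = (k % 2 == 1) := by
      rw [show (2 : Int) = ((2 : Nat) : Int) from rfl, PySem.Int.mod_natCast]
      rcases Nat.mod_two_eq_zero_or_one k with h | h <;> rw [h] <;> decide
    have hsucc : ((k : Int) + 1) = ((k + 1 : Nat) : Int) := by push_cast; ring
    have hpar : ((k + 1) % 2 == 1) = !(k % 2 == 1) := by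
      rcases Nat.mod_two_eq_zero_or_one k with h | h <;>
        simp [Nat.add_mod, h]
    rw [PySem.List.enumerate_cons, List.map_cons, join_cons]
    cases ss with
    | nil => simp [PySem.List.enumerate_nil, tailGlue, altOut, mod2_cast]
    | cons q t =>
      rw [hsucc, tailGlue_of_ne_nil _ (by simp [PySem.List.enumerate_cons]),
        ih (k + 1), hpar]
      simp [altOut, mod2_cast]

-- ===== VERDICT (by name: the statement is the Claim_ definition above) =====
theorem pack_spaces_spec : Claim_equal_pack_spaces := by
  intro line _
  unfold Spec_pack_spaces pack_spaces pack_spaces_alt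
  have hb := b_side (splitQ line.toList) 0
  simp only [Nat.cast_zero] at hb
  have ha := key line.toList.length line.toList false [] le_rfl (by intro _ _; simp)
  rw [ha]
  simp only [List.nil_append]
  rw [show ((0 : Nat) % 2 == 1) = false from rfl] at hb
  rw [hb]
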